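-- pv_equiv track=rewrite | github.com/bolcom/iris | src/iris/bin/sync_targets_bol.py | clean_plan
-- ===== SOURCE A (Python) =====
-- import copy
--
-- ignore_plan_fields = [
--     'created',
--     'creator',
--     'aggregation_reset',
--     'aggregation_window',
--     'id',
--     'name',
--     'plan_active.name',
--     'plan_id',
--     'threshold_count',
--     'threshold_window',
--     'tracking_key',
--     'tracking_template',
--     'tracking_type',
--     'user_id',
--     'type',
--     'team_id',
--     'all_steps',
-- ]
--
-- def clean_plan(plan):
--     clean_plan = copy.deepcopy(plan)
--     for field in ignore_plan_fields:
--         try: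
--             clean_plan.pop(field)
--         except KeyError:
--             pass
--     return clean_plan
-- ===== SOURCE B (Python) =====
-- import copy
--
-- IGNORE_PLAN_FIELDS = {
--     'created', 'creator', 'aggregation_reset', 'aggregation_window', 'id',
--     'name', 'plan_active.name', 'plan_id', 'threshold_count',
--     'threshold_window', 'tracking_key', 'tracking_template', 'tracking_type',
--     'user_id', 'type', 'team_id', 'all_steps',
-- }
--
-- def clean_plan(plan):
--     return {k: copy.deepcopy(v) for k, v in plan.items() if k not in IGNORE_PLAN_FIELDS}
-- ===== Notes on version B (the rewrite author's own statement) =====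
-- stated objective: idiomatic
-- what changed: B replaces the deepcopy-then-pop-each-known-field loop by a single dict comprehension over plan.items() that keeps only keys outside a constant ignore set.
import Mathlib
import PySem

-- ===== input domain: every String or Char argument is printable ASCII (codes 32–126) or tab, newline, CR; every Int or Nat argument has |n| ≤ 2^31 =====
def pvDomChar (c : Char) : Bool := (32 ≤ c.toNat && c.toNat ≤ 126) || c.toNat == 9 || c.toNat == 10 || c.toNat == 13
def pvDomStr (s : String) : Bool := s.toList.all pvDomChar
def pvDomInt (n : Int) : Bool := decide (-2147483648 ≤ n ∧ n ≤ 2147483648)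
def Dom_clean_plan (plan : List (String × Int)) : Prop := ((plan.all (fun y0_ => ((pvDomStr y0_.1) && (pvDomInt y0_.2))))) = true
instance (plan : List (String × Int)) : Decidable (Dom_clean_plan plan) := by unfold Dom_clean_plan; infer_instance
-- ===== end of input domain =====

-- B replaces A's deepcopy-then-pop-each-known-field loop by a single comprehension over the
-- plan's own items keeping keys outside a constant ignore set (idiomatic; same cost).

-- ===== PORT A =====
def pvIgnorePlanFields : List String :=
  ["created", "creator", "aggregation_reset", "aggregation_window", "id",
   "name", "plan_active.name", "plan_id", "threshold_count",
   "threshold_window", "tracking_key", "tracking_template", "tracking_type",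
   "user_id", "type", "team_id", "all_steps"]

-- clean_plan.pop(field) with 'except KeyError: pass': remove the entry for `field` if present
-- (dict keys are unique — Pre_ below — so removing the first match is exact), else unchanged.
def pvPopKey (l : List (String × Int)) (k : String) : List (String × Int) :=
  match l with
  | [] => []
  | p :: rest => if p.1 = k then rest else p :: pvPopKey rest k

-- copy.deepcopy(plan) is the list itself (immutable values); then the pop loop.
def clean_plan (plan : List (String × Int)) : List (String × Int) :=
  pvIgnorePlanFields.foldl pvPopKey plan

-- ===== PORT B =====
def pvIgnoreSet : PySem.Set String :=
  PySem.Set.ofList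
    ["created", "creator", "aggregation_reset", "aggregation_window", "id",
     "name", "plan_active.name", "plan_id", "threshold_count",
     "threshold_window", "tracking_key", "tracking_template", "tracking_type",
     "user_id", "type", "team_id", "all_steps"]

-- {k: deepcopy(v) for k, v in plan.items() if k not in IGNORE_PLAN_FIELDS}
def clean_plan_alt (plan : List (String × Int)) : List (String × Int) :=
  plan.filter (fun p => !(PySem.Set.contains pvIgnoreSet p.1))

-- ===== PRECONDITION & SPEC =====
-- Pre_ excludes association lists with duplicate keys: the Python argument is a dict, whose
-- association-list image always has distinct keys, so such lists represent no Python input.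
def Pre_clean_plan (plan : List (String × Int)) : Prop := (plan.map Prod.fst).Nodup
instance (plan : List (String × Int)) : Decidable (Pre_clean_plan plan) := by unfold Pre_clean_plan; infer_instance
def pvWitness_clean_plan : (List (String × Int)) := [("id", 3), ("steps", 1), ("foo", 2)]
def Spec_clean_plan (plan : List (String × Int)) (out : List (String × Int)) : Prop := out = clean_plan_alt plan
instance (plan : List (String × Int)) (out : List (String × Int)) : Decidable (Spec_clean_plan plan out) := by unfold Spec_clean_plan; infer_instance

-- ===== CLAIM (what is proved, stated in full; the proofs are below) =====
def Claim_equal_clean_plan : Prop := ∀ (plan : List (String × Int)), Dom_clean_plan plan → Pre_clean_plan plan → Spec_clean_plan plan (clean_plan plan)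

-- ===== LEMMAS AND PROOFS =====

theorem pvPopKey_eq_filter (l : List (String × Int)) (k : String)
    (h : (l.map Prod.fst).Nodup) :
    pvPopKey l k = l.filter (fun p => !(p.1 == k)) := by
  induction l with
  | nil => rfl
  | cons p rest ih =>
    simp only [List.map_cons, List.nodup_cons] at h
    by_cases hk : p.1 = k
    · subst hk
      simp only [pvPopKey, List.filter_cons]
      have : rest.filter (fun q => !(q.1 == p.1)) = rest := by
        apply List.filter_eq_self.mpr
        intro q hq
        have hne : q.1 ≠ p.1 := fun he => h.1 (he ▸ List.mem_map_of_mem (f := Prod.fst) hq)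
        simp [hne]
      simp [this]
    · simp [pvPopKey, hk, ih h.2]

theorem nodup_keys_filter (l : List (String × Int)) (q : String × Int → Bool)
    (h : (l.map Prod.fst).Nodup) : ((l.filter q).map Prod.fst).Nodup :=
  (((List.filter_sublist : (l.filter q).Sublist l)).map Prod.fst).nodup h

theorem foldl_pop_eq_filter (fields : List String) (l : List (String × Int))
    (h : (l.map Prod.fst).Nodup) :
    fields.foldl pvPopKey l = l.filter (fun p => !(fields.contains p.1)) := by
  induction fields generalizing l with
  | nil => simp
  | cons k ks ih =>
    rw [List.foldl_cons, ih (pvPopKey l k) (by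
      rw [pvPopKey_eq_filter l k h]; exact nodup_keys_filter _ _ h),
      pvPopKey_eq_filter l k h, List.filter_filter]
    apply List.filter_congr
    intro p _
    by_cases hpk : p.1 = k <;> simp [hpk, Bool.and_comm]

-- ===== VERDICT (by name: the statement is the Claim_ definition above) =====
theorem clean_plan_spec : Claim_equal_clean_plan := by
  intro plan _ hpre
  unfold Spec_clean_plan clean_plan clean_plan_alt
  rw [foldl_pop_eq_filter _ _ hpre]
  apply List.filter_congr
  intro p _
  congr 1
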